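-- pv_equiv track=rewrite | github.com/Aishwarya5898/lemmecode | minsum.py | created
-- ===== SOURCE A (Python) =====
-- def created(d,l):
--     co = []
--     for i in range(0,len(l)):
--         co.append(1)
--     i = 0
--     while i < len(l):
--         if l[i] in l[:i]:
--             co[i] = l.count(l[i])
--         i = i + 1
--     for i in range(0,len(l)):
--         d[i] = co[i]
--     return (d)
-- ===== SOURCE B (Python) =====
-- def created(d, l):
--     # Group indices by value in one pass, then scatter per group:
--     # the first index of each group gets 1, the rest get the group's size.
--     groups = {}
--     for i, v in enumerate(l):
--         groups.setdefault(v, []).append(i)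
--     co = [0] * len(l)
--     for idxs in groups.values():
--         co[idxs[0]] = 1
--         for j in idxs[1:]:
--             co[j] = len(idxs)
--     for i in range(len(l)):
--         d[i] = co[i]
--     return d
-- ===== Notes on version B (the rewrite author's own statement) =====
-- stated objective: faster
-- what changed: B first groups the indices of each value into a dict of index lists in one pass, then scatters per group (1 to the group's first index, the group size to the rest) into a result array, instead of A's per-index slice-membership test plus repeated l.count scans.
import Mathlib
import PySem

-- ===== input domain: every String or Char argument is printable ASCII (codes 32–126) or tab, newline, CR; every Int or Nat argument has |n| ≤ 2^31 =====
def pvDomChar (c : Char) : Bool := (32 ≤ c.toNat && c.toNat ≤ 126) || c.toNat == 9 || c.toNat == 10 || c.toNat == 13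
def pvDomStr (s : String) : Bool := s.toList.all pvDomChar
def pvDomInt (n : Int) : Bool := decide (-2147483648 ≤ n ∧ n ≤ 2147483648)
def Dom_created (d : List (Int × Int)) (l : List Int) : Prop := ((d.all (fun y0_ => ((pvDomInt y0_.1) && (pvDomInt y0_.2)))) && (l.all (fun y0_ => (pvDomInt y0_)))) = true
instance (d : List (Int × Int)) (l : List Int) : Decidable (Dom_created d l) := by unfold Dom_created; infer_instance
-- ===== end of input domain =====

-- B groups the indices of each value into a dict of index lists (one pass), then scatters
-- per group: 1 to the group's first index, the group size to the others; a last pass writes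
-- the array into d. Both Pythons mutate d in place; the equivalence proved here is about
-- the return value.

-- ===== PORT A =====
-- the 'while i < len(l)' loop of A, step for step (i is the loop counter)
def createdWhile (l : List Int) (co : List Int) (i : Nat) : List Int :=
  if _h : i < l.length then
    let co' :=
      if (PySem.List.slice l none (some (i : Int))).contains (PySem.List.pyGetD l (i : Int) 0) then
        PySem.List.pySetD co (i : Int) ((PySem.List.count l (PySem.List.pyGetD l (i : Int) 0) : Int))
      else co
    createdWhile l co' (i + 1)
  else co
termination_by l.length - i

def created (d : List (Int × Int)) (l : List Int) : List (Int × Int) :=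
  let co : List Int :=
    (PySem.List.pyRange 0 (l.length : Int) 1).foldl (fun co _ => co ++ [(1 : Int)]) []
  let co := createdWhile l co 0
  let dd :=
    (PySem.List.pyRange 0 (l.length : Int) 1).foldl
      (fun (dd : PySem.Dict Int Int) i => dd.insert i (PySem.List.pyGetD co i 0))
      (PySem.Dict.mk d)
  dd.items

-- ===== PORT B =====
def created_alt (d : List (Int × Int)) (l : List Int) : List (Int × Int) :=
  -- groups.setdefault(v, []).append(i) is exactly Dict.modify v [] (· ++ [i])
  let groups : PySem.Dict Int (List Int) :=
    (PySem.List.enumerate l 0).foldl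
      (fun (g : PySem.Dict Int (List Int)) p => g.modify p.2 [] (· ++ [p.1]))
      PySem.Dict.empty
  let co : List Int := PySem.List.pyRepeat [(0 : Int)] (l.length : Int)
  -- every group is nonempty and its indices are in range, so pyGetD/pySetD are exact here
  let co :=
    groups.values.foldl
      (fun co idxs =>
        let co := PySem.List.pySetD co (PySem.List.pyGetD idxs 0 0) 1
        (PySem.List.slice idxs (some 1) none).foldl
          (fun co j => PySem.List.pySetD co j (PySem.List.len idxs)) co)
      co
  let dd :=
    (PySem.List.pyRange 0 (l.length : Int) 1).foldl
      (fun (dd : PySem.Dict Int Int) i => dd.insert i (PySem.List.pyGetD co i 0))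
      (PySem.Dict.mk d)
  dd.items

-- ===== PRECONDITION & SPEC =====
def Spec_created (d : List (Int × Int)) (l : List Int) (out : List (Int × Int)) : Prop := out = created_alt d l
instance (d : List (Int × Int)) (l : List Int) (out : List (Int × Int)) : Decidable (Spec_created d l out) := by unfold Spec_created; infer_instance

-- ===== CLAIM (what is proved, stated in full; the proofs are below) =====
def Claim_equal_created : Prop := ∀ (d : List (Int × Int)) (l : List Int), Dom_created d l → Spec_created d l (created d l)

-- ===== LEMMAS AND PROOFS =====

-- the value both programs end up storing at index i: the full count of l[i] if l[i]
-- occurred before index i, else 1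
def gval (l : List Int) (i : Int) : Int :=
  if (l.take i.toNat).contains (PySem.List.pyGetD l i 0) then
    (PySem.List.count l (PySem.List.pyGetD l i 0) : Int)
  else 1

-- the (Nat) indices at which v occurs in l, in increasing order
def idx (l : List Int) (v : Int) : List Nat :=
  (List.range l.length).filter (fun j => l[j]? == some v)

-- the same indices as Ints (what B's grouping dict stores for v)
def grpI (l : List Int) (v : Int) : List Int := (idx l v).map (Nat.cast : Nat → Int)

theorem createdWhile_length (l co : List Int) (i : Nat) :
    (createdWhile l co i).length = co.length := by
  fun_induction createdWhile l co i with
  | case1 co i h co' ih =>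
    rw [ih]
    simp only [co']
    split <;> simp
  | case2 _ _ _ => rfl

theorem createdWhile_getElem? (l co : List Int) (i : Nat)
    (hlen : co.length = l.length)
    (hup : ∀ j, i ≤ j → j < co.length → co[j]? = some 1) (j : Nat) :
    (createdWhile l co i)[j]? =
      if j < i then co[j]? else if j < l.length then some (gval l (j : Int)) else none := by
  fun_induction createdWhile l co i with
  | case1 co i h co' ih =>
    by_cases hc : (PySem.List.slice l none (some (i : Int))).contains (PySem.List.pyGetD l (i : Int) 0) = true
    · have hco' : co' = co.set i ((PySem.List.count l (PySem.List.pyGetD l (i : Int) 0) : Int)) := by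
        simp only [co']; rw [dif_pos hc]; rw [PySem.List.pySetD_natCast]
      have hlen' : co'.length = l.length := by simp [hco', hlen]
      have hup' : ∀ k, i + 1 ≤ k → k < co'.length → co'[k]? = some 1 := by
        intro k hik hk
        rw [hco', List.getElem?_set_ne (by omega)]
        exact hup k (by omega) (by simpa [hco'] using hk)
      rw [ih hlen' hup']
      rcases lt_trichotomy j i with hji | rfl | hji
      · simp only [hco']
        rw [List.getElem?_set_ne (by omega)]
        simp [hji, Nat.lt_succ_of_lt hji]
      · have hjl : j < co.length := by omega
        simp only [Nat.lt_succ_self, if_pos, lt_irrefl]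
        rw [hco', List.getElem?_set_self (by simpa using hjl)]
        have : gval l (j : Int) = (PySem.List.count l (PySem.List.pyGetD l (j : Int) 0) : Int) := by
          unfold gval
          rw [if_pos (by simpa [PySem.List.slice_to_natCast] using hc)]
        simp [this, h]
      · have h1 : ¬ j < i := by omega
        have h2 : ¬ j < i + 1 := by omega
        simp [h1, h2]
    · have hco' : co' = co := by simp only [co']; rw [dif_neg hc]
      rw [ih (hco' ▸ hlen) (by intro k hik; rw [hco']; exact fun hk => hup k (by omega) hk)]
      rcases lt_trichotomy j i with hji | rfl | hji
      · simp [hco', hji, Nat.lt_succ_of_lt hji]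
      · have hjl : j < co.length := by omega
        simp only [Nat.lt_succ_self, if_pos, lt_irrefl]
        rw [hco', hup j le_rfl hjl]
        have : gval l (j : Int) = 1 := by
          unfold gval
          rw [if_neg (by simpa [PySem.List.slice_to_natCast] using hc)]
        simp [this, h]
      · have h1 : ¬ j < i := by omega
        have h2 : ¬ j < i + 1 := by omega
        simp [h1, h2]
  | case2 co i h =>
    by_cases hji : j < i
    · simp [hji]
    · have : ¬ j < l.length := by omega
      simp [hji, this, hlen]

-- A's co-array entry read back at index i is gval l i
theorem cof_getD (l : List Int) (i : Int) (h0 : 0 ≤ i) (h1 : i < (l.length : Int)) :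
    PySem.List.pyGetD
      (createdWhile l
        ((PySem.List.pyRange 0 (l.length : Int) 1).foldl (fun co _ => co ++ [(1 : Int)]) []) 0)
      i 0 = gval l i := by
  have hco0 : ((PySem.List.pyRange 0 (l.length : Int) 1).foldl (fun co _ => co ++ [(1 : Int)]) ([] : List Int))
      = (PySem.List.pyRange 0 (l.length : Int) 1).map (fun _ => (1 : Int)) := by
    rw [PySem.List.foldl_append_singleton_eq_map (fun _ => (1 : Int))]
    exact List.nil_append _
  have hlen0 : ((PySem.List.pyRange 0 (l.length : Int) 1).foldl (fun co _ => co ++ [(1 : Int)]) ([] : List Int)).length = l.length := by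
    rw [hco0]; simp [PySem.List.length_pyRange_one]
  have hup : ∀ j, 0 ≤ j → j < ((PySem.List.pyRange 0 (l.length : Int) 1).foldl (fun co _ => co ++ [(1 : Int)]) ([] : List Int)).length →
      ((PySem.List.pyRange 0 (l.length : Int) 1).foldl (fun co _ => co ++ [(1 : Int)]) ([] : List Int))[j]? = some 1 := by
    intro j _ hj
    rw [hlen0] at hj
    rw [hco0]
    simp [hj]
  have h2 := createdWhile_getElem? l _ 0 hlen0 hup i.toNat
  have hnat : i.toNat < l.length := by omega
  have hlen : (createdWhile l ((PySem.List.pyRange 0 (l.length : Int) 1).foldl (fun co _ => co ++ [(1 : Int)]) ([] : List Int)) 0).length = l.length := by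
    rw [createdWhile_length, hlen0]
  rw [PySem.List.pyGetD_eq_getElem _ 0 h0 (by rw [hlen]; exact h1)]
  simp only [Nat.not_lt_zero, if_false, hnat, if_true] at h2
  obtain ⟨_, heq⟩ := List.getElem?_eq_some_iff.mp h2
  rw [heq, Int.toNat_of_nonneg h0]

theorem created_eq (d : List (Int × Int)) (l : List Int) :
    created d l = ((PySem.List.pyRange 0 (l.length : Int) 1).foldl
      (fun (dd : PySem.Dict Int Int) j => dd.insert j (gval l j)) (PySem.Dict.mk d)).items := by
  unfold created
  refine congrArg PySem.Dict.items ?_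
  refine PySem.List.foldl_congr_mem _ _ _ _ ?_
  intro acc x hx
  obtain ⟨hx0, hx1⟩ := PySem.List.mem_pyRange_one.mp hx
  rw [cof_getD l x hx0 hx1]

-- ---- B-side lemmas ----

theorem mem_idx (l : List Int) (v : Int) (j : Nat) :
    j ∈ idx l v ↔ l[j]? = some v := by
  constructor
  · intro h
    simpa using (List.mem_filter.mp h).2
  · intro h
    refine List.mem_filter.mpr ⟨List.mem_range.mpr ?_, by simpa using h⟩
    exact (List.getElem?_eq_some_iff.mp h).1

theorem nodup_idx (l : List Int) (v : Int) : (idx l v).Nodup :=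
  List.Nodup.filter _ List.nodup_range

theorem pairwise_idx (l : List Int) (v : Int) : (idx l v).Pairwise (· < ·) :=
  List.Pairwise.filter _ List.pairwise_lt_range

theorem idx_cons (x : Int) (xs : List Int) (v : Int) :
    idx (x :: xs) v = (if x = v then [0] else []) ++ (idx xs v).map Nat.succ := by
  unfold idx
  rw [show (x :: xs).length = xs.length + 1 from rfl, List.range_succ_eq_map]
  rw [List.filter_cons, List.filter_map]
  have h1 : (fun j => (x :: xs)[j]? == some v) ∘ Nat.succ = (fun j => xs[j]? == some v) := by
    funext j
    simp [Function.comp]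
  rw [h1]
  by_cases hxv : x = v
  · simp [hxv]
  · simp [hxv]

theorem length_idx (l : List Int) (v : Int) : (idx l v).length = l.count v := by
  induction l with
  | nil => simp [idx]
  | cons x xs ih =>
    rw [idx_cons, List.count_cons]
    by_cases hxv : x = v
    · simp [hxv, ih]
    · simp [hxv, ih]

theorem grp_eq (l : List Int) (v : Int) :
    ∀ s : Int, ((PySem.List.enumerate l s).filter (fun p => p.2 == v)).map (·.1)
      = (idx l v).map (fun j : Nat => s + (j : Int)) := by
  induction l with
  | nil => intro s; simp [PySem.List.enumerate_nil, idx]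
  | cons x xs ih =>
    intro s
    rw [PySem.List.enumerate_cons, List.filter_cons, idx_cons]
    by_cases hxv : x = v
    · have hb : ((s, x).2 == v) = true := by simpa using hxv
      rw [if_pos hb, if_pos hxv]
      rw [List.map_cons, ih (s + 1)]
      rw [List.singleton_append, List.map_cons, List.map_map]
      refine congrArg₂ List.cons (by simp) ?_
      refine List.map_congr_left ?_
      intro j _
      simp only [Function.comp_apply]
      push_cast
      ring
    · have hb : ((s, x).2 == v) = false := by simpa using hxv
      rw [if_neg (by simp [hb]), if_neg hxv]
      rw [ih (s + 1), List.nil_append, List.map_map]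
      refine List.map_congr_left ?_
      intro j _
      simp only [Function.comp_apply]
      push_cast
      ring

-- the body of B's per-group scatter step (exactly the step function in created_alt)
def wstep (co idxs : List Int) : List Int :=
  (PySem.List.slice idxs (some 1) none).foldl
    (fun co j => PySem.List.pySetD co j (PySem.List.len idxs))
    (PySem.List.pySetD co (PySem.List.pyGetD idxs 0 0) 1)

theorem setfold_length (t : List Int) (val : Int) :
    ∀ cs : List Int, (t.foldl (fun cs x => PySem.List.pySetD cs x val) cs).length = cs.length := by
  induction t with
  | nil => intro cs; rfl
  | cons x ts ih => intro cs; rw [List.foldl_cons, ih, PySem.List.length_pySetD]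

theorem setfold_getElem? (t : List Int) (val : Int) (ht : ∀ x ∈ t, 0 ≤ x) :
    ∀ (cs : List Int) (j : Nat),
      (t.foldl (fun cs x => PySem.List.pySetD cs x val) cs)[j]? =
        if (j : Int) ∈ t ∧ j < cs.length then some val else (cs[j]?) := by
  induction t with
  | nil => intro cs j; simp
  | cons x ts ih =>
    intro cs j
    have hx : 0 ≤ x := ht x (by simp)
    rw [List.foldl_cons, ih (fun y hy => ht y (by simp [hy]))]
    rw [PySem.List.pySetD_of_nonneg cs val hx]
    rw [List.getElem?_set, List.length_set]
    simp only [List.mem_cons]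
    by_cases h1 : ((j : Int) ∈ ts ∧ j < cs.length)
    · rw [if_pos h1, if_pos ⟨Or.inr h1.1, h1.2⟩]
    · rw [if_neg h1]
      split_ifs with hA hB hC hD hE
      · rfl
      · exact absurd ⟨Or.inl (by omega), by omega⟩ hC
      · exact hB (by omega)
      · exact (List.getElem?_eq_none (by omega)).symm
      · exfalso
        rcases hE with ⟨h' | h', hlt⟩
        · exact hA (by omega)
        · exact h1 ⟨h', hlt⟩
      · rfl

theorem wstep_length (cs idxs : List Int) : (wstep cs idxs).length = cs.length := by
  unfold wstep
  rw [setfold_length, PySem.List.length_pySetD]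

theorem wstep_grpI (l : List Int) (v : Int) (cs : List Int) (hv : v ∈ l)
    (hlen : cs.length = l.length) (j : Nat) :
    (wstep cs (grpI l v))[j]? =
      if l[j]? = some v then some (gval l (j : Int)) else (cs[j]?) := by
  rcases hidx : idx l v with _ | ⟨h0, tl⟩
  · exfalso
    have hlen0 := length_idx l v
    rw [hidx] at hlen0
    have hc := List.count_pos_iff.mpr hv
    simp at hlen0
    omega
  · have hmem0 : l[h0]? = some v := (mem_idx l v h0).mp (by rw [hidx]; exact List.mem_cons_self)
    have h0lt : h0 < l.length := (List.getElem?_eq_some_iff.mp hmem0).1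
    have hpair : ∀ k ∈ tl, h0 < k := by
      have := pairwise_idx l v
      rw [hidx] at this
      exact (List.pairwise_cons.mp this).1
    have hnd : h0 ∉ tl := by
      have := nodup_idx l v
      rw [hidx] at this
      exact (List.nodup_cons.mp this).1
    have hgrp : grpI l v = (h0 : Int) :: List.map (Nat.cast : Nat → Int) tl := by
      rw [grpI, hidx, List.map_cons]
    have hcount : (grpI l v).length = List.count v l := by
      rw [grpI, List.length_map, length_idx]
    unfold wstep
    rw [hgrp]
    have hget0 : PySem.List.pyGetD ((h0 : Int) :: List.map (Nat.cast : Nat → Int) tl) 0 0 = (h0 : Int) := by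
      simp [PySem.List.pyGetD]
    have hslice : PySem.List.slice ((h0 : Int) :: List.map (Nat.cast : Nat → Int) tl) (some 1) none
        = List.map (Nat.cast : Nat → Int) tl := by
      rw [show (1 : Int) = ((1 : Nat) : Int) from rfl, PySem.List.slice_from_natCast]
      simp
    rw [hget0, hslice]
    rw [setfold_getElem? _ _ (by rintro x hx; obtain ⟨n, _, rfl⟩ := List.mem_map.mp hx; positivity)]
    rw [PySem.List.pySetD_natCast, List.getElem?_set, List.length_set]
    have hmemt : ((j : Int) ∈ List.map (Nat.cast : Nat → Int) tl) ↔ j ∈ tl := by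
      constructor
      · rintro hm
        obtain ⟨n, hn, he⟩ := List.mem_map.mp hm
        have : n = j := by omega
        exact this ▸ hn
      · intro hm
        exact List.mem_map.mpr ⟨j, hm, rfl⟩
    have hval : PySem.List.len ((h0 : Int) :: List.map (Nat.cast : Nat → Int) tl) = (List.count v l : Int) := by
      rw [PySem.List.len_eq, ← hgrp, hcount]
    have hpg : PySem.List.pyGetD l (j : Int) 0 = l.getD j 0 := by
      rw [PySem.List.pyGetD_natCast]
    by_cases hjv : l[j]? = some v
    · have hjidx : j ∈ idx l v := (mem_idx l v j).mpr hjv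
      have hjlt : j < l.length := (List.getElem?_eq_some_iff.mp hjv).1
      have hpgv : PySem.List.pyGetD l (j : Int) 0 = v := by
        rw [hpg]
        simpa [List.getD] using congrArg (fun o => o.getD 0) hjv
      rw [hidx] at hjidx
      rw [if_pos hjv]
      rcases List.mem_cons.mp hjidx with heq | hjt
      · subst heq
        rw [if_neg (fun h => hnd (hmemt.mp h.1))]
        rw [if_pos rfl, if_pos (by omega)]
        have hg : gval l (j : Int) = 1 := by
          unfold gval
          rw [if_neg ?_]
          intro hcont
          rw [hpgv, Int.toNat_natCast] at hcont
          have hvmem : v ∈ l.take j := List.mem_of_elem_eq_true hcont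
          obtain ⟨k, hk, hkv⟩ := List.getElem_of_mem hvmem
          have hklt : k < j := by
            have := List.length_take_le j l
            omega
          have hkmem : k ∈ idx l v := by
            rw [mem_idx, List.getElem?_eq_some_iff]
            refine ⟨by omega, ?_⟩
            rw [← hkv, List.getElem_take]
          rw [hidx] at hkmem
          rcases List.mem_cons.mp hkmem with rfl | hkt
          · omega
          · exact absurd (hpair k hkt) (by omega)
        rw [hg]
      · rw [if_pos ⟨hmemt.mpr hjt, by omega⟩, hval]
        have hg : gval l (j : Int) = (List.count v l : Int) := by
          unfold gval
          rw [hpgv, if_pos ?_, PySem.List.count_eq]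
          rw [Int.toNat_natCast]
          have h0j : h0 < j := hpair j hjt
          have hvmem : v ∈ l.take j := by
            have : (l.take j)[h0]? = some v := by
              rw [List.getElem?_take_of_lt h0j]
              exact hmem0
            exact List.mem_of_getElem? this
          exact List.elem_eq_true_of_mem hvmem
        rw [hg]
    · have hjn : j ∉ idx l v := fun h => hjv ((mem_idx l v j).mp h)
      rw [hidx] at hjn
      rw [if_neg hjv]
      rw [if_neg (fun h => hjn (List.mem_cons.mpr (Or.inr (hmemt.mp h.1))))]
      rw [if_neg (fun h => hjn (List.mem_cons.mpr (Or.inl h.symm)))]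

theorem outer_length (l : List Int) (vs : List Int) :
    ∀ cs : List Int, (vs.foldl (fun co v => wstep co (grpI l v)) cs).length = cs.length := by
  induction vs with
  | nil => intro cs; rfl
  | cons v vt ih => intro cs; rw [List.foldl_cons, ih, wstep_length]

theorem outer_fold (l : List Int) (vs : List Int) (hvs : ∀ v ∈ vs, v ∈ l) :
    ∀ cs : List Int, cs.length = l.length → ∀ j : Nat,
      (vs.foldl (fun co v => wstep co (grpI l v)) cs)[j]? =
        if ∃ v ∈ vs, l[j]? = some v then some (gval l (j : Int)) else (cs[j]?) := by
  induction vs with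
  | nil => intro cs _ j; simp
  | cons v vt ih =>
    intro cs hlen j
    rw [List.foldl_cons]
    rw [ih (fun w hw => hvs w (List.mem_cons.mpr (Or.inr hw))) _
        (by rw [wstep_length]; exact hlen)]
    rw [wstep_grpI l v cs (hvs v List.mem_cons_self) hlen j]
    by_cases hj : ∃ w ∈ vt, l[j]? = some w
    · rw [if_pos hj, if_pos (by obtain ⟨w, hw, hwe⟩ := hj; exact ⟨w, List.mem_cons.mpr (Or.inr hw), hwe⟩)]
    · rw [if_neg hj]
      by_cases hjv : l[j]? = some v
      · rw [if_pos hjv, if_pos ⟨v, List.mem_cons_self, hjv⟩]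
      · rw [if_neg hjv, if_neg ?_]
        rintro ⟨w, hw, hwe⟩
        rcases List.mem_cons.mp hw with rfl | hw'
        · exact hjv hwe
        · exact hj ⟨w, hw', hwe⟩

theorem groups_getD (l : List Int) (v : Int) :
    ((PySem.List.enumerate l 0).foldl
      (fun (g : PySem.Dict Int (List Int)) p => g.modify p.2 [] (· ++ [p.1]))
      PySem.Dict.empty).getD v [] = grpI l v := by
  have h1 : (PySem.List.enumerate l 0).foldl
      (fun (g : PySem.Dict Int (List Int)) p => g.modify p.2 [] (· ++ [p.1])) PySem.Dict.empty
      = ((PySem.List.enumerate l 0).map Prod.swap).foldl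
        (fun (g : PySem.Dict Int (List Int)) p => g.modify p.1 [] (· ++ [p.2])) PySem.Dict.empty := by
    rw [List.foldl_map]
    rfl
  rw [h1, PySem.Dict.getD_foldl_modify_append, PySem.Dict.getD_empty]
  rw [List.filter_map, List.map_map]
  have h2 : ((fun p : Int × Int => p.1 == v) ∘ Prod.swap) = (fun p : Int × Int => p.2 == v) := rfl
  have h3 : ((fun p : Int × Int => p.2) ∘ Prod.swap) = (fun p : Int × Int => p.1) := rfl
  rw [h2, h3]
  have h4 := grp_eq l v 0
  simp only [zero_add] at h4
  rw [List.nil_append, grpI]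
  exact h4

theorem created_alt_eq (d : List (Int × Int)) (l : List Int) :
    created_alt d l = ((PySem.List.pyRange 0 (l.length : Int) 1).foldl
      (fun (dd : PySem.Dict Int Int) j => dd.insert j (gval l j)) (PySem.Dict.mk d)).items := by
  have hnodup : ((PySem.List.enumerate l 0).foldl
      (fun (g : PySem.Dict Int (List Int)) p => g.modify p.2 [] (· ++ [p.1]))
      PySem.Dict.empty).keys.Nodup := by
    exact PySem.Dict.nodup_keys_foldl_modify_key _ _ _ _ _ (by simp)
  have hkeys : ((PySem.List.enumerate l 0).foldl
      (fun (g : PySem.Dict Int (List Int)) p => g.modify p.2 [] (· ++ [p.1]))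
      PySem.Dict.empty).keys = PySem.Set.ofList l := by
    rw [PySem.Dict.keys_foldl_modify_key]
    rw [PySem.List.map_snd_enumerate]
    rfl
  have hvalues : ((PySem.List.enumerate l 0).foldl
      (fun (g : PySem.Dict Int (List Int)) p => g.modify p.2 [] (· ++ [p.1]))
      PySem.Dict.empty).values = (PySem.Set.ofList l).map (fun v => grpI l v) := by
    rw [PySem.Dict.values_eq_map_keys _ hnodup ([] : List Int), hkeys]
    exact List.map_congr_left (fun v _ => groups_getD l v)
  have hform : created_alt d l = ((PySem.List.pyRange 0 (l.length : Int) 1).foldl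
      (fun (dd : PySem.Dict Int Int) i => dd.insert i (PySem.List.pyGetD
        ((((PySem.List.enumerate l 0).foldl
            (fun (g : PySem.Dict Int (List Int)) p => g.modify p.2 [] (· ++ [p.1]))
            PySem.Dict.empty).values).foldl
          (fun co idxs =>
            (PySem.List.slice idxs (some 1) none).foldl
              (fun co j => PySem.List.pySetD co j (PySem.List.len idxs))
              (PySem.List.pySetD co (PySem.List.pyGetD idxs 0 0) 1))
          (PySem.List.pyRepeat [(0 : Int)] (l.length : Int))) i 0))
      (PySem.Dict.mk d)).items := rfl
  rw [hform, hvalues]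
  have hco0 : PySem.List.pyRepeat [(0 : Int)] (l.length : Int) = List.replicate l.length (0 : Int) := by
    rw [PySem.List.pyRepeat_singleton, Int.toNat_natCast]
  rw [hco0, List.foldl_map]
  have hfun : (fun (x : List Int) (y : Int) =>
      (fun (co idxs : List Int) =>
        (PySem.List.slice idxs (some 1) none).foldl
          (fun co j => PySem.List.pySetD co j (PySem.List.len idxs))
          (PySem.List.pySetD co (PySem.List.pyGetD idxs 0 0) 1)) x (grpI l y))
      = (fun (co : List Int) (v : Int) => wstep co (grpI l v)) := rfl
  rw [hfun]
  refine congrArg PySem.Dict.items ?_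
  refine PySem.List.foldl_congr_mem _ _ _ _ ?_
  intro acc x hx
  obtain ⟨hx0, hx1⟩ := PySem.List.mem_pyRange_one.mp hx
  have hco : ((PySem.Set.ofList l).foldl
      (fun co v => wstep co (grpI l v)) (List.replicate l.length (0 : Int)))[x.toNat]?
      = some (gval l x) := by
    rw [outer_fold l _ (fun v hv => (PySem.Set.mem_ofList l v).mp hv) _ (by simp) x.toNat]
    rw [if_pos ?_]
    · rw [Int.toNat_of_nonneg hx0]
    · have hxl : x.toNat < l.length := by omega
      exact ⟨l[x.toNat], (PySem.Set.mem_ofList l _).mpr (List.getElem_mem hxl),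
        List.getElem?_eq_getElem hxl⟩
  have hlenco : ((PySem.Set.ofList l).foldl
      (fun co v => wstep co (grpI l v)) (List.replicate l.length (0 : Int))).length = l.length := by
    rw [outer_length]; simp
  rw [PySem.List.pyGetD_eq_getElem _ 0 hx0 (by rw [hlenco]; exact hx1)]
  obtain ⟨_, heq⟩ := List.getElem?_eq_some_iff.mp hco
  rw [heq]

-- ===== VERDICT (by name: the statement is the Claim_ definition above) =====
theorem created_spec : Claim_equal_created := by
  intro d l _
  unfold Spec_created
  rw [created_eq, created_alt_eq]
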